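-- pv_equiv track=rewrite | github.com/AbsaOSS/organizational-workflows | github/security/promote_alerts.py | render_secmeta
-- ===== SOURCE A (Python) =====
-- def render_secmeta(secmeta: dict[str, str]) -> str:
--     preferred_order = [
--         "schema",
--         "fingerprint",
--         "repo",
--         "source",
--         "tool",
--         "severity",
--         "cwe",
--         "category",
--         "rule_id",
--         "first_seen",
--         "last_seen",
--         "last_seen_commit",
--         "postponed_until",
--         "gh_alert_numbers",
--         "occurrence_count",
--         "last_occurrence_fp",
--     ]
--     lines: list[str] = []
--     for key in preferred_order:
--         if key in secmeta:
--             lines.append(f"{key}={secmeta.get(key, '')}")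
--     # include any additional keys deterministically
--     for key in sorted(k for k in secmeta.keys() if k not in set(preferred_order)):
--         lines.append(f"{key}={secmeta.get(key, '')}")
--     # Hidden metadata block for automation.
--     return "<!--secmeta\n" + "\n".join(lines) + "\n-->"
-- ===== SOURCE B (Python) =====
-- def render_secmeta(secmeta: dict[str, str]) -> str:
--     preferred_order = [
--         "schema",
--         "fingerprint",
--         "repo",
--         "source",
--         "tool",
--         "severity",
--         "cwe",
--         "category",
--         "rule_id",
--         "first_seen",
--         "last_seen",
--         "last_seen_commit",
--         "postponed_until",
--         "gh_alert_numbers",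
--         "occurrence_count",
--         "last_occurrence_fp",
--     ]
--     rank = {k: i for i, k in enumerate(preferred_order)}
--     n = len(preferred_order)
--     ordered = sorted(secmeta, key=lambda k: (rank.get(k, n), k))
--     lines = [f"{k}={secmeta.get(k, '')}" for k in ordered]
--     return "<!--secmeta\n" + "\n".join(lines) + "\n-->"
-- ===== Notes on version B (the rewrite author's own statement) =====
-- stated objective: idiomatic
-- what changed: A's two explicit loops (preferred keys in fixed order, then a sorted pass over the leftovers) are collapsed into one sorted pass over the dict's keys using a rank dict and the tuple sort key (rank.get(k, n), k).
import Mathlib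
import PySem

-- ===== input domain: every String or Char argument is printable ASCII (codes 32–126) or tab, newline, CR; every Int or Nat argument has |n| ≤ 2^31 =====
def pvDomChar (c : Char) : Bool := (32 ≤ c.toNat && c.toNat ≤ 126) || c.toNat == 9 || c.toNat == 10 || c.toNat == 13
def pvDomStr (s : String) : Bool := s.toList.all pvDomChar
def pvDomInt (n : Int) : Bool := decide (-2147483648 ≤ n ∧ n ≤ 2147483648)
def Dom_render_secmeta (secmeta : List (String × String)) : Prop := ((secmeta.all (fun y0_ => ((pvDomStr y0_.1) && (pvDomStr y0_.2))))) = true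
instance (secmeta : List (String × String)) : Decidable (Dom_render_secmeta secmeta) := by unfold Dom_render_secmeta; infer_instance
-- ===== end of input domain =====

-- B collapses A's two explicit loops into one sorted pass over the dict's keys,
-- driven by a rank dict and the tuple key (rank.get(k, n), k); same output, same cost.


-- the literal preferred_order list both Pythons carry
def pvPreferred : List String :=
  ["schema", "fingerprint", "repo", "source", "tool", "severity", "cwe", "category",
   "rule_id", "first_seen", "last_seen", "last_seen_commit", "postponed_until",
   "gh_alert_numbers", "occurrence_count", "last_occurrence_fp"]

-- ===== PORT A =====
def render_secmeta (secmeta : List (String × String)) : String :=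
  let d := PySem.Dict.ofList secmeta
  -- for key in preferred_order: if key in secmeta: lines.append(f"{key}={secmeta.get(key, '')}")
  let lines1 := pvPreferred.foldl
    (fun acc key => if d.contains key then acc ++ [key ++ "=" ++ d.getD key ""] else acc)
    ([] : List String)
  -- for key in sorted(k for k in secmeta.keys() if k not in set(preferred_order)): lines.append(...)
  let extras := PySem.List.sorted
    (d.keys.filter (fun k => !(PySem.Set.ofList pvPreferred).contains k)) (fun x => x)
  let lines := extras.foldl (fun acc key => acc ++ [key ++ "=" ++ d.getD key ""]) lines1
  "<!--secmeta\n" ++ PySem.Str.join "\n" lines ++ "\n-->"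

-- ===== PORT B =====
-- rank = {k: i for i, k in enumerate(preferred_order)}
def pvRank : PySem.Dict String Int :=
  PySem.Dict.ofList ((PySem.List.enumerate pvPreferred).map (fun p => (p.2, p.1)))

def render_secmeta_alt (secmeta : List (String × String)) : String :=
  let d := PySem.Dict.ofList secmeta
  let n : Int := (pvPreferred.length : Int)
  -- ordered = sorted(secmeta, key=lambda k: (rank.get(k, n), k))
  let ordered := PySem.List.sorted2 d.keys (fun k => pvRank.getD k n) (fun k => k)
  let lines := ordered.map (fun k => k ++ "=" ++ d.getD k "")
  "<!--secmeta\n" ++ PySem.Str.join "\n" lines ++ "\n-->"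

-- ===== PRECONDITION & SPEC =====
def Spec_render_secmeta (secmeta : List (String × String)) (out : String) : Prop := out = render_secmeta_alt secmeta
instance (secmeta : List (String × String)) (out : String) : Decidable (Spec_render_secmeta secmeta out) := by unfold Spec_render_secmeta; infer_instance

-- ===== CLAIM (what is proved, stated in full; the proofs are below) =====
def Claim_equal_render_secmeta : Prop := ∀ (secmeta : List (String × String)), Dom_render_secmeta secmeta → Spec_render_secmeta secmeta (render_secmeta secmeta)

-- ===== LEMMAS AND PROOFS =====

-- Python's tuple sort key (int, str) is the lexicographic order: sorted2 = sorted with a Lex key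
theorem pv_sorted2_eq_sorted_lex (xs : List String) (k1 : String → Int) :
    PySem.List.sorted2 xs k1 (fun k => k) =
      PySem.List.sorted xs (fun k => toLex (k1 k, k)) := by
  rw [PySem.List.sorted_eq_foldl_insertBy]
  simp only [PySem.List.sorted2]
  congr 1
  funext acc x
  congr 1
  funext a b
  rcases lt_trichotomy (k1 a) (k1 b) with h | h | h
  · simp [Prod.Lex.lt_iff, h]
  · simp [Prod.Lex.lt_iff, h]
  · simp [Prod.Lex.lt_iff, h, not_lt.mpr h.le, h.ne']

theorem pv_rank_default {k : String} (h : k ∉ pvPreferred) :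
    pvRank.getD k (pvPreferred.length : Int) = (pvPreferred.length : Int) := by
  apply PySem.Dict.getD_of_not_contains
  rw [PySem.Dict.contains_eq_decide_mem_keys]
  have hk : pvRank.keys = pvPreferred := by decide
  rw [hk]
  simp [h]

theorem pv_not_mem_of_filter {k : String} (h : (!(PySem.Set.ofList pvPreferred).contains k) = true) :
    k ∉ pvPreferred := by
  have hnd : pvPreferred.Nodup := by decide
  rw [PySem.Set.ofList_eq_self_of_nodup _ hnd] at h
  simpa [PySem.Set.contains] using h

-- the heart: A's concatenation IS the sorted order under the lex key
theorem pv_sorted_key_split (ks : List String) (hks : ks.Nodup)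
    (contains : String → Bool) (hc : ∀ k, contains k = true ↔ k ∈ ks) :
    PySem.List.sorted ks (fun k => toLex (pvRank.getD k (pvPreferred.length : Int), k)) =
      pvPreferred.filter contains ++
        PySem.List.sorted (ks.filter (fun k => !(PySem.Set.ofList pvPreferred).contains k)) (fun x => x) := by
  apply PySem.List.sorted_eq_of_perm_of_pairwise_lt
  · -- permutation
    have hzs := PySem.List.sorted_perm (ks.filter (fun k => !(PySem.Set.ofList pvPreferred).contains k)) (fun x : String => x) false
    have hys : (pvPreferred.filter contains).Perm
        (ks.filter (fun k => !(!(PySem.Set.ofList pvPreferred).contains k))) := by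
      have hnd : pvPreferred.Nodup := by decide
      rw [List.perm_ext_iff_of_nodup (hnd.filter _) (hks.filter _)]
      intro a
      simp only [List.mem_filter, Bool.not_not]
      constructor
      · rintro ⟨ha, hca⟩
        refine ⟨(hc a).mp hca, ?_⟩
        have hnds : pvPreferred.Nodup := by decide
        rw [PySem.Set.ofList_eq_self_of_nodup _ hnds]
        simp only [PySem.Set.contains]
        exact List.contains_iff_mem.mpr ha
      · rintro ⟨ha, hsa⟩
        refine ⟨?_, (hc a).mpr ha⟩
        have hnds : pvPreferred.Nodup := by decide
        rw [PySem.Set.ofList_eq_self_of_nodup _ hnds] at hsa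
        simpa only [PySem.Set.contains, List.contains_iff_mem] using hsa
    exact ((hys.append hzs).trans List.perm_append_comm).trans
      (List.filter_append_perm (fun k => !(PySem.Set.ofList pvPreferred).contains k) ks)
  · -- pairwise strict increase of the lex key
    rw [List.pairwise_append]
    refine ⟨?_, ?_, ?_⟩
    · -- preferred part: ranks strictly increase
      have hp : pvPreferred.Pairwise
          (fun a b => pvRank.getD a (pvPreferred.length : Int) < pvRank.getD b (pvPreferred.length : Int)) := by decide
      exact (List.Pairwise.sublist List.filter_sublist hp).imp
        (fun h => Prod.Lex.lt_iff.mpr (Or.inl h))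
    · -- extras part: equal ranks, names strictly increase
      have hnd : (PySem.List.sorted (ks.filter (fun k => !(PySem.Set.ofList pvPreferred).contains k)) (fun x : String => x)).Nodup :=
        (PySem.List.sorted_perm _ _ _).symm.nodup (hks.filter _)
      have hle := PySem.List.sorted_pairwise (ks.filter (fun k => !(PySem.Set.ofList pvPreferred).contains k)) (fun x : String => x)
      have hlt : (PySem.List.sorted (ks.filter (fun k => !(PySem.Set.ofList pvPreferred).contains k)) (fun x : String => x)).Pairwise (· < ·) :=
        (hle.and hnd).imp (fun h => lt_of_le_of_ne h.1 h.2)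
      refine hlt.imp_of_mem (fun ha hb h => ?_)
      have hna : _ ∉ pvPreferred := pv_not_mem_of_filter
        (List.mem_filter.mp ((PySem.List.sorted_perm _ _ _).mem_iff.mp ha)).2
      have hnb : _ ∉ pvPreferred := pv_not_mem_of_filter
        (List.mem_filter.mp ((PySem.List.sorted_perm _ _ _).mem_iff.mp hb)).2
      exact Prod.Lex.lt_iff.mpr (Or.inr ⟨by simp [pv_rank_default hna, pv_rank_default hnb], h⟩)
    · -- cross: every preferred key ranks below every extra key
      intro a ha b hb
      have haP : a ∈ pvPreferred := (List.mem_filter.mp ha).1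
      have hnb : b ∉ pvPreferred := pv_not_mem_of_filter
        (List.mem_filter.mp ((PySem.List.sorted_perm _ _ _).mem_iff.mp hb)).2
      have hlt : ∀ x ∈ pvPreferred, pvRank.getD x (pvPreferred.length : Int) < (pvPreferred.length : Int) := by decide
      exact Prod.Lex.lt_iff.mpr (Or.inl (by rw [pv_rank_default hnb]; exact hlt a haP))

-- ===== VERDICT (by name: the statement is the Claim_ definition above) =====
theorem render_secmeta_spec : Claim_equal_render_secmeta := by
  intro secmeta _
  unfold Spec_render_secmeta render_secmeta render_secmeta_alt
  simp only [PySem.List.foldl_append_if, PySem.List.foldl_append_singleton_eq_map,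
    List.nil_append, pv_sorted2_eq_sorted_lex]
  rw [pv_sorted_key_split (PySem.Dict.ofList secmeta).keys (PySem.Dict.nodup_keys_ofList secmeta)
    (fun k => (PySem.Dict.ofList secmeta).contains k)
    (fun k => by simp [PySem.Dict.contains_eq_decide_mem_keys])]
  rw [List.map_append]
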